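-- pv_equiv track=rewrite | github.com/legoYoda1/Teal_FYP_db | app/dashboard_functions.py | insert_filters
-- ===== SOURCE A (Python) =====
-- def insert_filters(query, filters_clause):
--     """
--     Insert filters before GROUP BY / ORDER BY / LIMIT if they exist.
--     """
--     # Keywords we care about
--     keywords = ['GROUP BY', 'ORDER BY', 'LIMIT']
--     upper_query = query.upper()
--
--     # Find the earliest keyword position
--     min_pos = len(query)
--     insert_pos = len(query)
--     for kw in keywords:
--         pos = upper_query.find(kw)
--         if pos != -1 and pos < min_pos:
--             min_pos = pos
--             insert_pos = pos
--
--     # If there's already a WHERE clause, insert with AND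
--     if 'WHERE' in upper_query:
--         return query[:insert_pos] + ' AND ' + filters_clause + ' ' + query[insert_pos:]
--     else:
--         return query[:insert_pos] + ' WHERE ' + filters_clause + ' ' + query[insert_pos:]
-- ===== SOURCE B (Python) =====
-- def insert_filters(query, filters_clause):
--     """
--     Insert filters before GROUP BY / ORDER BY / LIMIT if they exist.
--     One left-to-right scan: the insert position is the first index where any
--     of the three keywords starts (len(query) if none), instead of three
--     separate .find() calls combined with a running minimum.
--     """
--     upper_query = query.upper()
--     n = len(query)
--     pos = n
--     for i in range(n):
--         if upper_query.startswith(('GROUP BY', 'ORDER BY', 'LIMIT'), i):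
--             pos = i
--             break
--     connector = ' AND ' if 'WHERE' in upper_query else ' WHERE '
--     return query[:pos] + connector + filters_clause + ' ' + query[pos:]
-- ===== Notes on version B (the rewrite author's own statement) =====
-- stated objective: alternative
-- what changed: The insert position is found by one left-to-right scan for the first index where any of the three keywords starts (falling back to len(query)), replacing A's three separate .find() calls combined with a running minimum; the connector is chosen once instead of duplicating the splice in two branches.
import Mathlib
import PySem

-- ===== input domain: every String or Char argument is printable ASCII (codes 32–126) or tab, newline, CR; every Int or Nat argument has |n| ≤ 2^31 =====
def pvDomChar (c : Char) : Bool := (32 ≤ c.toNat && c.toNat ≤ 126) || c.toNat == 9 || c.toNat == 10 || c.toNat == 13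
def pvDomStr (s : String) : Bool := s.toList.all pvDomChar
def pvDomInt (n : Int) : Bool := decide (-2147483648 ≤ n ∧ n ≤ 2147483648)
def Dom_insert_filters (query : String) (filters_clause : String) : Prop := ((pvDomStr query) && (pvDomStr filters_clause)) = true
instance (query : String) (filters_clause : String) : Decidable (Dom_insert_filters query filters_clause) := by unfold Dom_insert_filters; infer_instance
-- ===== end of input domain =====

-- B computes the insert position with one left-to-right scan for the first keyword
-- occurrence instead of three .find() calls combined with a running minimum (alternative, not faster).


-- ===== PORT A =====
-- literal transliteration of A: upper the query, fold over the three keywords keeping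
-- (min_pos, insert_pos), then splice with ' AND ' / ' WHERE ' depending on 'WHERE' in upper_query
def insert_filters (query : String) (filters_clause : String) : String :=
  let qs := query.toList
  let upper_query := PySem.Chars.upper qs
  let st : Int × Int :=
    ["GROUP BY".toList, "ORDER BY".toList, "LIMIT".toList].foldl
      (fun (st : Int × Int) kw =>
        let pos := PySem.Chars.find upper_query kw
        if pos ≠ -1 ∧ pos < st.1 then (pos, pos) else st)
      ((qs.length : Int), (qs.length : Int))
  let insert_pos := st.2
  if PySem.Chars.isIn "WHERE".toList upper_query then
    String.ofList (PySem.Chars.slice qs none (some insert_pos) ++ " AND ".toList ++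
               filters_clause.toList ++ " ".toList ++ PySem.Chars.slice qs (some insert_pos) none)
  else
    String.ofList (PySem.Chars.slice qs none (some insert_pos) ++ " WHERE ".toList ++
               filters_clause.toList ++ " ".toList ++ PySem.Chars.slice qs (some insert_pos) none)

-- ===== PORT B =====
-- u.startswith(kw, i) with 0 ≤ i ≤ len(u) is exactly 'drop i starts with kw': the scan
-- over i in range(n) with break is this structural recursion over the suffixes of u.
def matchAnyKw (s : List Char) : Bool :=
  PySem.Chars.startswith s "GROUP BY".toList || PySem.Chars.startswith s "ORDER BY".toList ||
    PySem.Chars.startswith s "LIMIT".toList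

def firstKwPos : List Char → Nat
  | [] => 0
  | c :: rest => if matchAnyKw (c :: rest) then 0 else firstKwPos rest + 1

def insert_filters_alt (query : String) (filters_clause : String) : String :=
  let qs := query.toList
  let upper_query := PySem.Chars.upper qs
  let pos := firstKwPos upper_query
  let connector := if PySem.Chars.isIn "WHERE".toList upper_query then " AND ".toList else " WHERE ".toList
  String.ofList (qs.take pos ++ connector ++ filters_clause.toList ++ " ".toList ++ qs.drop pos)

-- ===== PRECONDITION & SPEC =====
def Spec_insert_filters (query : String) (filters_clause : String) (out : String) : Prop := out = insert_filters_alt query filters_clause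
instance (query : String) (filters_clause : String) (out : String) : Decidable (Spec_insert_filters query filters_clause out) := by unfold Spec_insert_filters; infer_instance

-- ===== CLAIM (what is proved, stated in full; the proofs are below) =====
def Claim_equal_insert_filters : Prop := ∀ (query : String) (filters_clause : String), Dom_insert_filters query filters_clause → Spec_insert_filters query filters_clause (insert_filters query filters_clause)

-- ===== LEMMAS AND PROOFS =====

theorem firstKwPos_le_length (u : List Char) : firstKwPos u ≤ u.length := by
  induction u with
  | nil => simp [firstKwPos]
  | cons c rest ih =>
      simp only [firstKwPos, List.length_cons]
      split <;> omega

theorem firstKwPos_lt (u : List Char) : ∀ j, j < firstKwPos u → matchAnyKw (u.drop j) = false := by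
  induction u with
  | nil => simp [firstKwPos]
  | cons c rest ih =>
      intro j hj
      simp only [firstKwPos] at hj
      split at hj
      · omega
      · cases j with
        | zero => simpa using ‹¬ _ = true›
        | succ j => exact ih j (by omega)

theorem firstKwPos_hit (u : List Char) (h : firstKwPos u ≠ u.length) :
    matchAnyKw (u.drop (firstKwPos u)) = true := by
  induction u with
  | nil => simp [firstKwPos] at h
  | cons c rest ih =>
      simp only [firstKwPos, List.length_cons] at h ⊢
      split_ifs at h ⊢ with hc
      · simpa using hc
      · rw [List.drop_succ_cons]
        exact ih (by omega)

theorem matchAnyKw_iff (s : List Char) :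
    matchAnyKw s = true ↔
      "GROUP BY".toList <+: s ∨ "ORDER BY".toList <+: s ∨ "LIMIT".toList <+: s := by
  simp [matchAnyKw, PySem.Chars.startswith_iff, or_assoc]

-- find facts specialised to one keyword against the characterisation of firstKwPos
theorem find_kw_ge (u kw : List Char) (m : Nat)
    (hlt : ∀ j, j < m → matchAnyKw (u.drop j) = false)
    (hmem : ∀ s, kw <+: s → matchAnyKw s = true) :
    PySem.Chars.find u kw = -1 ∨ ((m : Int) ≤ PySem.Chars.find u kw) := by
  by_cases h : PySem.Chars.find u kw = -1
  · exact Or.inl h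
  · right
    have hnn : 0 ≤ PySem.Chars.find u kw := by
      have := PySem.Chars.neg_one_le_find (s := u) (sub := kw); omega
    obtain ⟨hpre, -⟩ := PySem.Chars.find_spec (s := u) (sub := kw) hnn
    have : ¬ (PySem.Chars.find u kw).toNat < m := by
      intro hc
      have := hlt _ hc
      rw [hmem _ hpre] at this; exact absurd this (by simp)
    omega

theorem find_kw_le (u kw : List Char) (m : Nat)
    (hm : kw <+: u.drop m) :
    0 ≤ PySem.Chars.find u kw ∧ PySem.Chars.find u kw ≤ (m : Int) := by
  have hin : kw <:+: u := (hm.isInfix).trans (List.drop_suffix m u).isInfix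
  have hnn : 0 ≤ PySem.Chars.find u kw :=
    (PySem.Chars.find_nonneg_iff (s := u) (sub := kw)).2 hin
  obtain ⟨-, hmin⟩ := PySem.Chars.find_spec (s := u) (sub := kw) hnn
  refine ⟨hnn, ?_⟩
  have : ¬ m < (PySem.Chars.find u kw).toNat := fun hc => hmin m hc hm
  omega

-- the three-keyword fold of A lands exactly on firstKwPos
theorem fold_eq_firstKwPos (u : List Char) :
    (["GROUP BY".toList, "ORDER BY".toList, "LIMIT".toList].foldl
      (fun (st : Int × Int) kw =>
        let pos := PySem.Chars.find u kw
        if pos ≠ -1 ∧ pos < st.1 then (pos, pos) else st)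
      ((u.length : Int), (u.length : Int))).2 = (firstKwPos u : Int) := by
  set m := firstKwPos u with hm
  have hmle : m ≤ u.length := firstKwPos_le_length u
  have hlt := firstKwPos_lt u
  have h1 := find_kw_ge u "GROUP BY".toList m (by exact hlt)
    (fun s hs => (matchAnyKw_iff s).2 (Or.inl hs))
  have h2 := find_kw_ge u "ORDER BY".toList m (by exact hlt)
    (fun s hs => (matchAnyKw_iff s).2 (Or.inr (Or.inl hs)))
  have h3 := find_kw_ge u "LIMIT".toList m (by exact hlt)
    (fun s hs => (matchAnyKw_iff s).2 (Or.inr (Or.inr hs)))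
  have hub : m = u.length ∨
      (0 ≤ PySem.Chars.find u "GROUP BY".toList ∧ PySem.Chars.find u "GROUP BY".toList ≤ (m : Int)) ∨
      (0 ≤ PySem.Chars.find u "ORDER BY".toList ∧ PySem.Chars.find u "ORDER BY".toList ≤ (m : Int)) ∨
      (0 ≤ PySem.Chars.find u "LIMIT".toList ∧ PySem.Chars.find u "LIMIT".toList ≤ (m : Int)) := by
    by_cases h : m = u.length
    · exact Or.inl h
    · right
      have := (matchAnyKw_iff _).1 (firstKwPos_hit u (hm ▸ h))
      rcases this with h' | h' | h'
      · exact Or.inl (find_kw_le u _ m h')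
      · exact Or.inr (Or.inl (find_kw_le u _ m h'))
      · exact Or.inr (Or.inr (find_kw_le u _ m h'))
  simp only [List.foldl]
  split_ifs <;> simp_all <;> omega

theorem length_upper (l : List Char) : (PySem.Chars.upper l).length = l.length := by
  simp [PySem.Chars.upper]

-- ===== VERDICT (by name: the statement is the Claim_ definition above) =====
theorem insert_filters_spec : Claim_equal_insert_filters := by
  intro query filters_clause _
  show insert_filters query filters_clause = insert_filters_alt query filters_clause
  unfold insert_filters insert_filters_alt
  simp only []
  set qs := query.toList with hqs
  set u := PySem.Chars.upper qs with hu
  have hlen : u.length = qs.length := length_upper qs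
  have hfold := fold_eq_firstKwPos u
  rw [hlen] at hfold
  rw [hfold]
  have hle : firstKwPos u ≤ qs.length := hlen ▸ firstKwPos_le_length u
  rw [PySem.Chars.slice_eq_listSlice, PySem.Chars.slice_eq_listSlice,
      PySem.List.slice_to_natCast, PySem.List.slice_from_natCast]
  split_ifs <;> rfl
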